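-- pv_equiv track=rewrite | github.com/dragneel786/leetcode_practise | 2425-bitwise-xor-of-all-pairings/2425-bitwise-xor-of-all-pairings.py | xorAllNums
-- ===== SOURCE A (Python) =====
-- from typing import List
--
-- def xorAllNums(nums1: List[int], nums2: List[int]) -> int:
--     m, n = len(nums1), len(nums2)
--     res = 0
--     for num in nums1:
--         res ^= 0 if(n % 2 == 0) else num
--
--     for num in nums2:
--         res ^= 0 if(m % 2 == 0) else num
--
--     return res
-- ===== SOURCE B (Python) =====
-- from typing import List
--
-- def xorAllNums(nums1: List[int], nums2: List[int]) -> int: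
--     # Definitional algorithm: XOR together every pairing nums1[i] ^ nums2[j].
--     res = 0
--     for a in nums1:
--         for b in nums2:
--             res ^= a ^ b
--     return res
-- ===== Notes on version B (the rewrite author's own statement) =====
-- stated objective: alternative
-- what changed: B computes the answer directly from the problem's definition with a nested loop XORing every pairing a ^ b, instead of A's linear two-pass parity trick; it trades speed for the obviously-correct definitional algorithm.
import Mathlib
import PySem

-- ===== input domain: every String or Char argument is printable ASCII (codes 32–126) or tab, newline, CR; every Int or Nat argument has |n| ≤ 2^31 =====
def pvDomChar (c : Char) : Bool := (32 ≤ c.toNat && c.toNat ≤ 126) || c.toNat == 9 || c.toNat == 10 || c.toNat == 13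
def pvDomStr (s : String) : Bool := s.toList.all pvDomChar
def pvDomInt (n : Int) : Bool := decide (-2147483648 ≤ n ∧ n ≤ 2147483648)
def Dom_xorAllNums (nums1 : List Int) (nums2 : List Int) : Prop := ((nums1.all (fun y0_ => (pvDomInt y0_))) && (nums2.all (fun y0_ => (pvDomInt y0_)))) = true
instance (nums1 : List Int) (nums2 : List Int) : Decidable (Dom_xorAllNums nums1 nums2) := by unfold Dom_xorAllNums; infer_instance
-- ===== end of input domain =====

-- B replaces A's linear two-pass parity trick with the definitional nested-loop
-- algorithm XORing every pairing a ^ b (alternative algorithm; slower, but direct).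

-- ===== PORT A =====
def xorAllNums (nums1 : List Int) (nums2 : List Int) : Int :=
  let m := nums1.length
  let n := nums2.length
  let res := nums1.foldl (fun res num => PySem.Int.bxor res (if n % 2 == 0 then 0 else num)) 0
  nums2.foldl (fun res num => PySem.Int.bxor res (if m % 2 == 0 then 0 else num)) res

-- ===== PORT B =====
def xorAllNums_alt (nums1 : List Int) (nums2 : List Int) : Int :=
  nums1.foldl
    (fun res a => nums2.foldl (fun res b => PySem.Int.bxor res (PySem.Int.bxor a b)) res)
    0

-- ===== PRECONDITION & SPEC =====
def Spec_xorAllNums (nums1 : List Int) (nums2 : List Int) (out : Int) : Prop := out = xorAllNums_alt nums1 nums2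
instance (nums1 : List Int) (nums2 : List Int) (out : Int) : Decidable (Spec_xorAllNums nums1 nums2 out) := by unfold Spec_xorAllNums; infer_instance

-- ===== CLAIM (what is proved, stated in full; the proofs are below) =====
def Claim_equal_xorAllNums : Prop := ∀ (nums1 : List Int) (nums2 : List Int), Dom_xorAllNums nums1 nums2 → Spec_xorAllNums nums1 nums2 (xorAllNums nums1 nums2)

-- ===== LEMMAS AND PROOFS =====

-- encode an Int as (sign, two's-complement magnitude); bxor acts componentwise there
def pvEnc (z : Int) : Bool × Nat := if 0 ≤ z then (false, z.toNat) else (true, (-z).toNat - 1)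
def pvDec (p : Bool × Nat) : Int := if p.1 then -(p.2 : Int) - 1 else (p.2 : Int)

theorem pvEnc_dec (p : Bool × Nat) : pvEnc (pvDec p) = p := by
  rcases p with ⟨b, n⟩
  cases b
  · simp [pvEnc, pvDec]
  · simp only [pvEnc, pvDec, if_true]
    rw [if_neg (by omega)]
    simp
    omega

theorem pvBxor_enc (a b : Int) :
    PySem.Int.bxor a b = pvDec (xor (pvEnc a).1 (pvEnc b).1, (pvEnc a).2 ^^^ (pvEnc b).2) := by
  unfold PySem.Int.bxor pvEnc pvDec
  split_ifs <;> simp_all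

theorem pvBxor_assoc (a b c : Int) :
    PySem.Int.bxor (PySem.Int.bxor a b) c = PySem.Int.bxor a (PySem.Int.bxor b c) := by
  simp only [pvBxor_enc, pvEnc_dec, Bool.xor_assoc, Nat.xor_assoc]

theorem pvBxor_zero_left (a : Int) : PySem.Int.bxor 0 a = a := by
  rw [PySem.Int.bxor_comm]; exact PySem.Int.bxor_zero a

theorem pvBxor_left_comm (a b c : Int) :
    PySem.Int.bxor a (PySem.Int.bxor b c) = PySem.Int.bxor b (PySem.Int.bxor a c) := by
  rw [← pvBxor_assoc, PySem.Int.bxor_comm a b, pvBxor_assoc]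

-- a XOR-accumulating fold from any seed factors through the seed
theorem foldl_bxor_g_seed (g : Int → Int) :
    ∀ (xs : List Int) (s : Int),
      xs.foldl (fun r x => PySem.Int.bxor r (g x)) s =
        PySem.Int.bxor s (xs.foldl (fun r x => PySem.Int.bxor r (g x)) 0) := by
  intro xs
  induction xs with
  | nil => intro s; simp [PySem.Int.bxor_zero]
  | cons x xs ih =>
    intro s
    simp only [List.foldl]
    rw [ih (PySem.Int.bxor s (g x)), ih (PySem.Int.bxor 0 (g x)), pvBxor_zero_left, pvBxor_assoc]

theorem pvBxor_self_left (a b : Int) :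
    PySem.Int.bxor a (PySem.Int.bxor a b) = b := by
  rw [← pvBxor_assoc, PySem.Int.bxor_self, pvBxor_zero_left]

-- B's inner loop: XOR of a against every element of l
theorem pvInner (a : Int) :
    ∀ (l : List Int),
      l.foldl (fun r b => PySem.Int.bxor r (PySem.Int.bxor a b)) 0 =
        PySem.Int.bxor (if l.length % 2 == 1 then a else 0)
          (l.foldl (fun r b => PySem.Int.bxor r b) 0) := by
  intro l
  induction l with
  | nil => simp
  | cons b l ih =>
    simp only [List.foldl, List.length_cons]
    rw [foldl_bxor_g_seed (fun b => PySem.Int.bxor a b), ih, pvBxor_zero_left,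
        foldl_bxor_g_seed (fun b => b) l (PySem.Int.bxor 0 b), pvBxor_zero_left]
    rcases Nat.mod_two_eq_zero_or_one l.length with h | h
    · have h' : (l.length + 1) % 2 = 1 := by omega
      simp [h, h', PySem.Int.bxor_comm, pvBxor_left_comm, pvBxor_self_left, pvBxor_zero_left]
    · have h' : (l.length + 1) % 2 = 0 := by omega
      simp [h, h', PySem.Int.bxor_comm, pvBxor_left_comm, pvBxor_self_left, pvBxor_zero_left]

-- B's outer loop after the inner loop is summarised
theorem pvOuter (c : Bool) (X2 : Int) :
    ∀ (l : List Int),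
      l.foldl (fun r a => PySem.Int.bxor r (PySem.Int.bxor (if c then a else 0) X2)) 0 =
        PySem.Int.bxor (if c then l.foldl (fun r x => PySem.Int.bxor r x) 0 else 0)
          (if l.length % 2 == 1 then X2 else 0) := by
  intro l
  induction l with
  | nil => cases c <;> simp
  | cons a l ih =>
    simp only [List.foldl, List.length_cons]
    rw [foldl_bxor_g_seed (fun a => PySem.Int.bxor (if c then a else 0) X2), ih, pvBxor_zero_left,
        foldl_bxor_g_seed (fun x => x) l (PySem.Int.bxor 0 a), pvBxor_zero_left]
    rcases Nat.mod_two_eq_zero_or_one l.length with h | h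
    · have h' : (l.length + 1) % 2 = 1 := by omega
      cases c <;>
        simp [h, h', PySem.Int.bxor_comm, pvBxor_left_comm, pvBxor_self_left, pvBxor_zero_left]
    · have h' : (l.length + 1) % 2 = 0 := by omega
      cases c <;>
        simp [h, h', PySem.Int.bxor_comm, pvBxor_left_comm, pvBxor_self_left, pvBxor_zero_left]

-- closed form of A
theorem pvA_closed (nums1 nums2 : List Int) :
    xorAllNums nums1 nums2 =
      PySem.Int.bxor (if nums2.length % 2 == 1 then nums1.foldl (fun r x => PySem.Int.bxor r x) 0 else 0)
        (if nums1.length % 2 == 1 then nums2.foldl (fun r x => PySem.Int.bxor r x) 0 else 0) := by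
  unfold xorAllNums
  simp only
  have hg : ∀ (d : Bool) (xs : List Int) (s : Int),
      xs.foldl (fun res num => PySem.Int.bxor res (if d then 0 else num)) s =
        if d then s else PySem.Int.bxor s (xs.foldl (fun r x => PySem.Int.bxor r x) 0) := by
    intro d xs
    induction xs with
    | nil => intro s; cases d <;> simp [PySem.Int.bxor_zero]
    | cons x xs ih =>
      intro s
      cases d
      · simp only [List.foldl, if_neg (by simp : ¬ (false = true))] at *
        rw [ih (PySem.Int.bxor s x),
            foldl_bxor_g_seed (fun x => x) xs (PySem.Int.bxor 0 x), pvBxor_zero_left, pvBxor_assoc]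
      · simp
  have e1 : ∀ n : Nat, (n % 2 == 0) = !(n % 2 == 1) := by
    intro n; rcases Nat.mod_two_eq_zero_or_one n with h | h <;> simp [h]
  rw [e1, e1, hg, hg]
  cases h2 : (nums2.length % 2 == 1) <;> cases h1 : (nums1.length % 2 == 1) <;>
    simp [PySem.Int.bxor_zero, pvBxor_zero_left]

-- closed form of B
theorem pvB_closed (nums1 nums2 : List Int) :
    xorAllNums_alt nums1 nums2 =
      PySem.Int.bxor (if nums2.length % 2 == 1 then nums1.foldl (fun r x => PySem.Int.bxor r x) 0 else 0)
        (if nums1.length % 2 == 1 then nums2.foldl (fun r x => PySem.Int.bxor r x) 0 else 0) := by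
  unfold xorAllNums_alt
  have hfun : (fun (res a : Int) =>
      nums2.foldl (fun res b => PySem.Int.bxor res (PySem.Int.bxor a b)) res) =
      (fun (res a : Int) => PySem.Int.bxor res
        (PySem.Int.bxor (if (nums2.length % 2 == 1 : Bool) then a else 0)
          (nums2.foldl (fun r b => PySem.Int.bxor r b) 0))) := by
    funext r a
    rw [foldl_bxor_g_seed (fun b => PySem.Int.bxor a b), pvInner]
  rw [hfun, pvOuter]

-- ===== VERDICT (by name: the statement is the Claim_ definition above) =====
theorem xorAllNums_spec : Claim_equal_xorAllNums := by
  intro nums1 nums2 _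
  unfold Spec_xorAllNums
  rw [pvA_closed, pvB_closed]
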